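-- pv_equiv track=rewrite | github.com/leechehao/chehaonlp | umls_ner/utils.py | get_comma
-- ===== SOURCE A (Python) =====
-- def get_comma(words, collect_loc_combine):
--     result = []
--     for idx, word in enumerate(words):
--         if word == ',' or word == ';':
--             block = True
--             for item in collect_loc_combine:
--                 if item[0] <= idx and idx < item[1]:
--                     block = False
--                     break
--             if block:
--                 result.append((idx, idx+1, 'comma'))
--     return result
-- ===== SOURCE B (Python) =====
-- def get_comma(words, collect_loc_combine):
--     n = len(words)
--     covered = [False] * n
--     for a, b in collect_loc_combine:
--         for i in range(max(a, 0), min(b, n)):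
--             covered[i] = True
--     return [(i, i + 1, 'comma') for i, w in enumerate(words)
--             if (w == ',' or w == ';') and not covered[i]]
-- ===== Notes on version B (the rewrite author's own statement) =====
-- stated objective: alternative
-- what changed: B precomputes a boolean coverage array from the intervals once and then does a single pass over the words testing coverage by O(1) lookup, instead of scanning the interval list for every comma; it trades the per-comma interval scan for an upfront marking pass.
import Mathlib
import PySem

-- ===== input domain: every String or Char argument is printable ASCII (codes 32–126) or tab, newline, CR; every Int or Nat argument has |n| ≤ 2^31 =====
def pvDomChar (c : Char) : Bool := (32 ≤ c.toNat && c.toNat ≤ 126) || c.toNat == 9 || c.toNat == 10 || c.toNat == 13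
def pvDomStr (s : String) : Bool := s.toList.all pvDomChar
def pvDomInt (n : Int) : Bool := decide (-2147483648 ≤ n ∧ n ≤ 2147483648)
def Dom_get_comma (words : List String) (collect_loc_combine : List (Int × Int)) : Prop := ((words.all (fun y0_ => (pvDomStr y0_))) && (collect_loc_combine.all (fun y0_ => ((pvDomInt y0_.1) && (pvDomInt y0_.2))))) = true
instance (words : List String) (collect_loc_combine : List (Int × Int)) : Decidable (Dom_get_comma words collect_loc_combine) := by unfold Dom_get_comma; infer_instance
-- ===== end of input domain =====

-- B replaces A's per-comma scan over the interval list by a boolean coverage array built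
-- once from the intervals, then a single indexed pass over the words (alternative algorithm).


-- ===== PORT A =====
-- inner 'for item in collect_loc_combine: … break' loop of A
def pvBlock (idx : Int) : List (Int × Int) → Bool
  | [] => true
  | item :: rest => if item.1 ≤ idx && idx < item.2 then false else pvBlock idx rest

def get_comma (words : List String) (collect_loc_combine : List (Int × Int)) : List (Int × Int × String) :=
  (PySem.List.enumerate words).foldl
    (fun result iw =>
      if iw.2 == "," || iw.2 == ";" then
        if pvBlock iw.1 collect_loc_combine then result ++ [(iw.1, iw.1 + 1, "comma")] else result
      else result) []

-- ===== PORT B =====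
-- 'for i in range(max(a, 0), min(b, n)): covered[i] = True'
def pvMark (covered : List Bool) (a b : Int) : List Bool :=
  (PySem.List.pyRange (max a 0) (min b (covered.length : Int)) 1).foldl
    (fun c i => PySem.List.pySetD c i true) covered

def get_comma_alt (words : List String) (collect_loc_combine : List (Int × Int)) : List (Int × Int × String) :=
  let covered := collect_loc_combine.foldl (fun c it => pvMark c it.1 it.2)
    (List.replicate words.length false)
  (PySem.List.enumerate words).filterMap (fun iw =>
    if (iw.2 == "," || iw.2 == ";") && !(PySem.List.pyGetD covered iw.1 false) then
      some (iw.1, iw.1 + 1, "comma")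
    else none)

-- ===== PRECONDITION & SPEC =====
def Spec_get_comma (words : List String) (collect_loc_combine : List (Int × Int)) (out : List (Int × Int × String)) : Prop := out = get_comma_alt words collect_loc_combine
instance (words : List String) (collect_loc_combine : List (Int × Int)) (out : List (Int × Int × String)) : Decidable (Spec_get_comma words collect_loc_combine out) := by unfold Spec_get_comma; infer_instance

-- ===== CLAIM (what is proved, stated in full; the proofs are below) =====
def Claim_equal_get_comma : Prop := ∀ (words : List String) (collect_loc_combine : List (Int × Int)), Dom_get_comma words collect_loc_combine → Spec_get_comma words collect_loc_combine (get_comma words collect_loc_combine)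

-- ===== LEMMAS AND PROOFS =====

theorem pvBlock_eq_not_any (idx : Int) (l : List (Int × Int)) :
    pvBlock idx l = !(l.any fun it => it.1 ≤ idx && idx < it.2) := by
  induction l with
  | nil => rfl
  | cons it rest ih =>
    simp only [pvBlock, List.any_cons, Bool.not_or]
    split_ifs with h
    · simp [h]
    · simp [h, ih]

theorem foldSet_length (r : List Int) (c : List Bool) :
    (r.foldl (fun c i => PySem.List.pySetD c i true) c).length = c.length := by
  induction r generalizing c with
  | nil => rfl
  | cons i r ih => simp [List.foldl_cons, ih, PySem.List.length_pySetD]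

theorem foldSet_getD (r : List Int) (c : List Bool) (k : Nat)
    (hr : ∀ i ∈ r, 0 ≤ i ∧ i < (c.length : Int)) (hk : k < c.length) :
    PySem.List.pyGetD (r.foldl (fun c i => PySem.List.pySetD c i true) c) (k : Int) false
      = (PySem.List.pyGetD c (k : Int) false || decide ((k : Int) ∈ r)) := by
  induction r generalizing c with
  | nil => simp
  | cons i r ih =>
    obtain ⟨hi0, hilt⟩ := hr i (List.mem_cons_self)
    have hset : PySem.List.pySetD c i true = c.set i.toNat true :=
      PySem.List.pySetD_of_nonneg c true hi0
    have hlen : (PySem.List.pySetD c i true).length = c.length := PySem.List.length_pySetD c i true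
    rw [List.foldl_cons, ih _ (fun j hj => by rw [hlen]; exact hr j (List.mem_cons_of_mem _ hj))
        (by rw [hlen]; exact hk)]
    have hkg : PySem.List.pyGetD (PySem.List.pySetD c i true) (k : Int) false
        = (if i.toNat = k then true else PySem.List.pyGetD c (k : Int) false) := by
      rw [hset]
      simp only [PySem.List.pyGetD_natCast]
      rw [List.getD_eq_getElem _ _ (by simpa using hk), List.getD_eq_getElem _ _ (by simpa using hk)]
      simp [List.getElem_set]
    rw [hkg]
    by_cases hik : (k : Int) = i
    · have : i.toNat = k := by omega
      simp [this, hik]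
    · have : ¬ (i.toNat = k) := by omega
      simp [this, hik]

theorem pvMark_length (c : List Bool) (a b : Int) : (pvMark c a b).length = c.length :=
  foldSet_length _ c

theorem pvMark_getD (c : List Bool) (a b : Int) (k : Nat) (hk : k < c.length) :
    PySem.List.pyGetD (pvMark c a b) (k : Int) false
      = (PySem.List.pyGetD c (k : Int) false || (a ≤ (k : Int) && (k : Int) < b)) := by
  unfold pvMark
  rw [foldSet_getD _ c k
    (fun i hi => by
      rw [PySem.List.mem_pyRange_one] at hi
      constructor <;> omega) hk]
  have hmem : ((k : Int) ∈ PySem.List.pyRange (max a 0) (min b (c.length : Int)) 1)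
      ↔ (a ≤ (k : Int) ∧ (k : Int) < b) := by
    rw [PySem.List.mem_pyRange_one]; omega
  simp [hmem]

theorem covered_getD (items : List (Int × Int)) (c : List Bool) (k : Nat) (hk : k < c.length) :
    PySem.List.pyGetD (items.foldl (fun c it => pvMark c it.1 it.2) c) (k : Int) false
      = (PySem.List.pyGetD c (k : Int) false
          || items.any (fun it => it.1 ≤ (k : Int) && (k : Int) < it.2)) := by
  induction items generalizing c with
  | nil => simp
  | cons it rest ih =>
    rw [List.foldl_cons, ih _ (by rw [pvMark_length]; exact hk),
        pvMark_getD c it.1 it.2 k hk]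
    simp [Bool.or_assoc]

theorem filterMap_if_eq_map_filter {α β : Type} (p : α → Bool) (g : α → β) (l : List α) :
    l.filterMap (fun x => if p x then some (g x) else none) = (l.filter p).map g := by
  induction l with
  | nil => rfl
  | cons x xs ih =>
    by_cases h : p x <;> simp [h, ih]

-- ===== VERDICT (by name: the statement is the Claim_ definition above) =====
theorem get_comma_spec : Claim_equal_get_comma := by
  intro words items _
  unfold Spec_get_comma get_comma get_comma_alt
  have hA : (PySem.List.enumerate words).foldl
      (fun result (iw : Int × String) =>
        if iw.2 == "," || iw.2 == ";" then
          if pvBlock iw.1 items then result ++ [(iw.1, iw.1 + 1, "comma")] else result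
        else result) ([] : List (Int × Int × String))
      = ((PySem.List.enumerate words).filter
          (fun iw => (iw.2 == "," || iw.2 == ";") && pvBlock iw.1 items)).map
          (fun iw => (iw.1, iw.1 + 1, "comma")) := by
    induction PySem.List.enumerate words using List.reverseRecOn with
    | nil => rfl
    | append_singleton l x ih =>
      rw [List.foldl_append, List.filter_append, List.map_append, List.foldl_cons,
          List.foldl_nil, ih, List.filter_singleton]
      by_cases h1 : (x.2 == "," || x.2 == ";") = true <;>
        by_cases h2 : pvBlock x.1 items = true <;>
        simp [h1, h2]
  rw [hA, filterMap_if_eq_map_filter]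
  congr 1
  apply List.filter_congr
  intro iw hiw
  obtain ⟨k, hklt, rfl⟩ := (PySem.List.mem_enumerate_iff words 0 iw).mp hiw
  simp only [zero_add]
  rw [pvBlock_eq_not_any,
      covered_getD items _ k (by simpa using hklt)]
  simp
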